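-- pv_equiv track=rewrite | github.com/abhiniveshmitra/final_temporal_community_search | calculate_max_gravity_table.py | calculate_max_gravity_table
-- ===== SOURCE A (Python) =====
-- def calculate_max_gravity_table(GravityTable):
--     MaxGravityTable = {}
--     for entry in GravityTable:
--         node1, node2, gravity = entry
--         if node1 not in MaxGravityTable:
--             MaxGravityTable[node1] = (gravity, node2)
--         else:
--             if gravity > MaxGravityTable[node1][0]:
--                 MaxGravityTable[node1] = (gravity, node2)
--         if node2 not in MaxGravityTable:
--             MaxGravityTable[node2] = (gravity, node1)
--         else:
--             if gravity > MaxGravityTable[node2][0]: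
--                 MaxGravityTable[node2] = (gravity, node1)
--     return MaxGravityTable
-- ===== SOURCE B (Python) =====
-- def calculate_max_gravity_table(GravityTable):
--     adjacency = {}
--     for entry in GravityTable:
--         node1, node2, gravity = entry
--         adjacency.setdefault(node1, []).append((gravity, node2))
--         adjacency.setdefault(node2, []).append((gravity, node1))
--     return {node: max(pairs, key=lambda t: t[0]) for node, pairs in adjacency.items()}
-- ===== Notes on version B (the rewrite author's own statement) =====
-- stated objective: alternative
-- what changed: A keeps a running best-(gravity, neighbor) per node and conditionally replaces it on each edge; B first builds the full adjacency dict mapping each node to all its (gravity, neighbor) pairs, then takes max(pairs, key=first) per node in a second pass.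
import Mathlib
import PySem

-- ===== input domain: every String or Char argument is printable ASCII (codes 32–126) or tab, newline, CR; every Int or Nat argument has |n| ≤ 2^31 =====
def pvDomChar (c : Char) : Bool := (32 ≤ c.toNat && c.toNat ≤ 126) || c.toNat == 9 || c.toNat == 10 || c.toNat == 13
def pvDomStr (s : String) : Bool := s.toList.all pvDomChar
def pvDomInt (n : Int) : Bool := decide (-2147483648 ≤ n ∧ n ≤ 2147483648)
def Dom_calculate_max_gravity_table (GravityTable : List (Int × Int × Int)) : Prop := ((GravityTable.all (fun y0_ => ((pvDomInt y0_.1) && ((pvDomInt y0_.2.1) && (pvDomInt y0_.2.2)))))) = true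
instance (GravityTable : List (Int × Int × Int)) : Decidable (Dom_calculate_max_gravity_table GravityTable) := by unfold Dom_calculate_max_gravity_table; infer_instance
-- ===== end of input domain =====

-- B replaces A's running "best so far per node" updates by building the full adjacency
-- dict first and taking each node's max afterwards (objective: alternative decomposition).

-- ===== PORT A =====
-- A's per-key update: insert on first sight, replace only on strictly greater gravity.
def pvUpdA (d : PySem.Dict Int (Int × Int)) (k g n : Int) : PySem.Dict Int (Int × Int) :=
  if d.contains k = false then d.insert k (g, n)
  else if g > (d.getD k (0, 0)).1 then d.insert k (g, n) else d

def calculate_max_gravity_table (GravityTable : List (Int × Int × Int)) : List (Int × Int × Int) :=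
  (GravityTable.foldl
    (fun d e => pvUpdA (pvUpdA d e.1 e.2.2 e.2.1) e.2.1 e.2.2 e.1)
    PySem.Dict.empty).items

-- ===== PORT B =====
-- B's per-key update: adjacency.setdefault(k, []).append((g, n)).
def pvUpdB (d : PySem.Dict Int (List (Int × Int))) (k g n : Int) : PySem.Dict Int (List (Int × Int)) :=
  d.modify k [] (· ++ [(g, n)])

-- max(pairs, key=lambda t: t[0]); the default (0,0) is never used: every adjacency list is nonempty.
def pvMaxPair (l : List (Int × Int)) : Int × Int :=
  PySem.List.maxD l (fun t => t.1) (0, 0)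

def calculate_max_gravity_table_alt (GravityTable : List (Int × Int × Int)) : List (Int × Int × Int) :=
  let adjacency := GravityTable.foldl
    (fun d e => pvUpdB (pvUpdB d e.1 e.2.2 e.2.1) e.2.1 e.2.2 e.1)
    PySem.Dict.empty
  adjacency.items.map (fun p => (p.1, pvMaxPair p.2))

-- ===== PRECONDITION & SPEC =====
def Spec_calculate_max_gravity_table (GravityTable : List (Int × Int × Int)) (out : List (Int × Int × Int)) : Prop := out = calculate_max_gravity_table_alt GravityTable
instance (GravityTable : List (Int × Int × Int)) (out : List (Int × Int × Int)) : Decidable (Spec_calculate_max_gravity_table GravityTable out) := by unfold Spec_calculate_max_gravity_table; infer_instance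

-- ===== CLAIM (what is proved, stated in full; the proofs are below) =====
def Claim_equal_calculate_max_gravity_table : Prop := ∀ (GravityTable : List (Int × Int × Int)), Dom_calculate_max_gravity_table GravityTable → Spec_calculate_max_gravity_table GravityTable (calculate_max_gravity_table GravityTable)

-- ===== LEMMAS AND PROOFS =====

-- read off a node's best pair from its adjacency list
def pvF (p : Int × List (Int × Int)) : Int × Int × Int := (p.1, pvMaxPair p.2)

-- invariant tying A's dict to B's adjacency dict
def pvRel (dA : PySem.Dict Int (Int × Int)) (dB : PySem.Dict Int (List (Int × Int))) : Prop :=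
  dB.keys.Nodup ∧ (∀ p ∈ dB.items, p.2 ≠ []) ∧ dA.items = dB.items.map pvF

theorem pvMax?_isSome (l : List (Int × Int)) (h : l ≠ []) :
    ∃ m, PySem.List.max? l (fun t => t.1) = some m := by
  cases l with
  | nil => exact absurd rfl h
  | cons x xs =>
    clear h
    induction xs generalizing x with
    | nil => exact ⟨x, rfl⟩
    | cons y ys ih =>
      simp only [PySem.List.max?, List.foldl_cons] at ih ⊢
      split
      · exact ih _
      · exact ih _

theorem pvMaxPair_append (l : List (Int × Int)) (v : Int × Int) (h : l ≠ []) :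
    pvMaxPair (l ++ [v]) = if (pvMaxPair l).1 < v.1 then v else pvMaxPair l := by
  obtain ⟨m, hm⟩ := pvMax?_isSome l h
  simp only [pvMaxPair, PySem.List.maxD, PySem.List.max?, List.foldl_append]
  simp only [PySem.List.max?] at hm
  rw [hm]
  simp only [List.foldl_cons, List.foldl_nil]
  by_cases h2 : m.1 < v.1 <;> simp [h2]

theorem pvContains_eq {dA : PySem.Dict Int (Int × Int)} {dB : PySem.Dict Int (List (Int × Int))}
    (h : dA.items = dB.items.map pvF) (k : Int) : dA.contains k = dB.contains k := by
  simp [PySem.Dict.contains, h, List.any_map, Function.comp_def, pvF]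

theorem pvGet?_eq {dA : PySem.Dict Int (Int × Int)} {dB : PySem.Dict Int (List (Int × Int))}
    (h : dA.items = dB.items.map pvF) (k : Int) :
    dA.get? k = (dB.get? k).map (fun l => pvMaxPair l) := by
  simp only [PySem.Dict.get?, h, List.find?_map, Option.map_map, Function.comp_def, pvF]

-- the heart: one per-key update preserves the invariant
theorem pvStep {dA : PySem.Dict Int (Int × Int)} {dB : PySem.Dict Int (List (Int × Int))}
    (h : pvRel dA dB) (k g n : Int) : pvRel (pvUpdA dA k g n) (pvUpdB dB k g n) := by
  obtain ⟨hnd, hne, hitems⟩ := h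
  have hcont := pvContains_eq hitems k
  by_cases hc : dB.contains k = true
  · -- key already present: B appends (g,n); A replaces iff strictly greater
    obtain ⟨l, hl⟩ : ∃ l, dB.get? k = some l := by
      have := PySem.Dict.contains_eq_isSome_get? dB k
      rw [hc] at this
      exact Option.isSome_iff_exists.mp this.symm
    have hlmem : (k, l) ∈ dB.items := (PySem.Dict.get?_eq_some_iff_mem_items dB k l hnd).mp hl
    have hlne : l ≠ [] := hne _ hlmem
    have hgetB : dB.getD k [] = l := PySem.Dict.getD_of_get?_eq_some dB [] hl
    have hgetA : dA.getD k (0, 0) = pvMaxPair l := by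
      simp [PySem.Dict.getD, pvGet?_eq hitems k, hl]
    have hUB : pvUpdB dB k g n = dB.insert k (l ++ [(g, n)]) := by
      simp [pvUpdB, PySem.Dict.modify, hgetB]
    have hBitems : (pvUpdB dB k g n).items
        = dB.items.map (fun p => if (p.1 == k) = true then (k, l ++ [(g, n)]) else p) := by
      rw [hUB, PySem.Dict.items_insert_of_contains dB _ hc]
    have hBkeys : (pvUpdB dB k g n).keys = dB.keys := by
      rw [hUB, PySem.Dict.keys_insert_of_contains dB _ hc]
    refine ⟨by rw [hBkeys]; exact hnd, ?_, ?_⟩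
    · intro p hp
      rw [hBitems] at hp
      obtain ⟨q, hq, hqe⟩ := List.mem_map.mp hp
      by_cases hqk : (q.1 == k) = true <;> simp [hqk] at hqe <;> subst hqe
      · simp
      · exact hne _ hq
    · have hmaxapp : pvMaxPair (l ++ [(g, n)])
          = if (pvMaxPair l).1 < g then (g, n) else pvMaxPair l := by
        rw [pvMaxPair_append l (g, n) hlne]
      by_cases hg : g > (dA.getD k (0, 0)).1
      · -- strictly greater: A inserts, B's appended max is the new pair
        have hgt : (pvMaxPair l).1 < g := by rw [hgetA] at hg; exact hg
        have hAc : dA.contains k = true := by rw [hcont]; exact hc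
        have : pvUpdA dA k g n = dA.insert k (g, n) := by
          simp [pvUpdA, hAc, hg]
        rw [this, PySem.Dict.items_insert_of_contains dA _ hAc, hBitems, hitems,
          List.map_map, List.map_map]
        apply List.map_congr_left
        intro p _
        by_cases hpk : (p.1 == k) = true <;>
          simp [Function.comp, pvF, hpk, hmaxapp, hgt]
      · -- not greater: A keeps its entry, B's appended max is unchanged
        have hngt : ¬ (pvMaxPair l).1 < g := by rw [hgetA] at hg; exact hg
        have hAc : dA.contains k = true := by rw [hcont]; exact hc
        have : pvUpdA dA k g n = dA := by simp [pvUpdA, hAc, hg]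
        rw [this, hBitems, List.map_map, hitems]
        apply List.map_congr_left
        intro p hp
        by_cases hpk : (p.1 == k) = true
        · have hk : p.1 = k := by simpa using hpk
          have hpl : p.2 = l := by
            have : dB.get? k = some p.2 := by
              rw [← hk]
              exact (PySem.Dict.get?_eq_some_iff_mem_items dB p.1 p.2 hnd).mpr (by simpa using hp)
            rw [hl] at this; exact (Option.some_inj.mp this).symm
          simp [Function.comp, pvF, hmaxapp, hngt, hk, hpl]
        · simp [Function.comp, pvF, hpk]
  · -- fresh key: both sides append a new entry
    have hc' : dB.contains k = false := by simpa using hc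
    have hAc : dA.contains k = false := by rw [hcont]; exact hc'
    have hUB : pvUpdB dB k g n = dB.insert k [(g, n)] := by
      simp [pvUpdB, PySem.Dict.modify, PySem.Dict.getD_of_not_contains dB _ hc']
    have hUA : pvUpdA dA k g n = dA.insert k (g, n) := by simp [pvUpdA, hAc]
    refine ⟨?_, ?_, ?_⟩
    · rw [hUB, PySem.Dict.keys_insert_of_not_contains dB _ hc']
      simp [List.nodup_append, hnd]
      intro a ha hak
      subst hak
      exact absurd ((PySem.Dict.contains_iff_mem_keys dB a).mpr ha) (by simp [hc'])
    · intro p hp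
      rw [hUB, PySem.Dict.items_insert_of_not_contains dB _ hc'] at hp
      rcases List.mem_append.mp hp with hp | hp
      · exact hne _ hp
      · simp at hp; subst hp; simp
    · rw [hUA, hUB, PySem.Dict.items_insert_of_not_contains dB _ hc',
        PySem.Dict.items_insert_of_not_contains dA _ hAc, hitems, List.map_append]
      rfl

theorem pvFold (l : List (Int × Int × Int)) (dA : PySem.Dict Int (Int × Int))
    (dB : PySem.Dict Int (List (Int × Int))) (h : pvRel dA dB) :
    pvRel (l.foldl (fun d e => pvUpdA (pvUpdA d e.1 e.2.2 e.2.1) e.2.1 e.2.2 e.1) dA)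
      (l.foldl (fun d e => pvUpdB (pvUpdB d e.1 e.2.2 e.2.1) e.2.1 e.2.2 e.1) dB) := by
  induction l generalizing dA dB with
  | nil => exact h
  | cons e es ih => exact ih _ _ (pvStep (pvStep h e.1 e.2.2 e.2.1) e.2.1 e.2.2 e.1)

-- ===== VERDICT (by name: the statement is the Claim_ definition above) =====
theorem calculate_max_gravity_table_spec : Claim_equal_calculate_max_gravity_table := by
  intro GravityTable _
  unfold Spec_calculate_max_gravity_table calculate_max_gravity_table calculate_max_gravity_table_alt
  have h := pvFold GravityTable PySem.Dict.empty PySem.Dict.empty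
    ⟨by simp, by simp [PySem.Dict.empty], by simp [PySem.Dict.empty]⟩
  exact h.2.2
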